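-- pv_equiv track=rewrite | github.com/bettercallzaal/ZAOVideoEditor | backend/services/filler_detection.py | _check_phrase_filler
-- ===== SOURCE A (Python) =====
-- FILLER_PHRASES = [
--     ["you", "know"],
--     ["i", "mean"],
--     ["kind", "of"],
--     ["sort", "of"],
--     ["like", "you", "know"],
-- ]
--
-- def _check_phrase_filler(words: list, idx: int) -> bool:
--     """Check if words starting at idx match any filler phrase."""
--     for phrase in FILLER_PHRASES:
--         if idx + len(phrase) <= len(words):
--             match = True
--             for j, p_word in enumerate(phrase):
--                 w = words[idx + j]["word"].strip().lower().rstrip(".,!?;:")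
--                 if w != p_word:
--                     match = False
--                     break
--             if match:
--                 return True
--     return False
-- ===== SOURCE B (Python) =====
-- FILLER_PHRASES = [
--     ["you", "know"],
--     ["i", "mean"],
--     ["kind", "of"],
--     ["sort", "of"],
--     ["like", "you", "know"],
-- ]
--
--
-- def _check_phrase_filler(words: list, idx: int) -> bool:
--     """Check if words starting at idx match any filler phrase."""
--     # breadth-wise refinement: keep the suffixes of the fitting phrases whose
--     # consumed prefix matches, reading each word position at most once
--     cands = [p for p in FILLER_PHRASES if idx + len(p) <= len(words)]
--     d = 0
--     while cands:
--         if any(not p for p in cands):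
--             return True
--         w = words[idx + d]["word"].strip().lower().rstrip(".,!?;:")
--         cands = [p[1:] for p in cands if p[0] == w]
--         d += 1
--     return False
-- ===== Notes on version B (the rewrite author's own statement) =====
-- stated objective: alternative
-- what changed: B replaces A's per-phrase nested comparison loop by a breadth-wise refinement: it keeps the suffixes of the fitting phrases that still match, normalizes each word position at most once, and filters the candidate set per position (an implicit trie walk).
import Mathlib
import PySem

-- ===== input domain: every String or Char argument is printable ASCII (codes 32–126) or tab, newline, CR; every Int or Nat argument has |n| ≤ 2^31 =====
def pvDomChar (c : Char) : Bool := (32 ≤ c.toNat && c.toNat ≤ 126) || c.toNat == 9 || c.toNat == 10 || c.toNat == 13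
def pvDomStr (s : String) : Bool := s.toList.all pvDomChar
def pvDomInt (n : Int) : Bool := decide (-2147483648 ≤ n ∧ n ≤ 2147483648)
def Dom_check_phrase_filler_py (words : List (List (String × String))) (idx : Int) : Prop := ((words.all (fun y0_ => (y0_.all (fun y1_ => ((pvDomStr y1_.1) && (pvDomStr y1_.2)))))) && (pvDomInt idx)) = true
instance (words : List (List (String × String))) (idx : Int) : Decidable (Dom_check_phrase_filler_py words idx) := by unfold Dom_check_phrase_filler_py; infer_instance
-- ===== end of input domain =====

set_option maxHeartbeats 1000000


-- B replaces A's per-phrase nested comparison loop by a breadth-wise refinement of the set of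
-- fitting phrase suffixes, normalizing each word position at most once (objective: alternative).

-- s.rstrip(chars) ported by hand (PySem has no rstrip-with-chars): drop trailing chars of the
-- set from the right; exact for any chars argument.
def pvRstripChars (s : String) (chars : List Char) : String :=
  String.ofList ((s.toList.reverse.dropWhile (fun c => chars.contains c)).reverse)

-- words[i]["word"].strip().lower().rstrip(".,!?;:") — the shared normalization chain of both
-- Pythons (total form; under Pre_ the .getD defaults are never reached on accessed positions)
def pvNorm (words : List (List (String × String))) (i : Int) : String :=
  pvRstripChars
    (PySem.Str.lower (PySem.Str.strip
      ((PySem.Dict.get? (PySem.Dict.mk ((PySem.List.pyGet? words i).getD [])) "word").getD "")))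
    ['.', ',', '!', '?', ';', ':']

-- ===== PORT A =====
def FILLER_PHRASES : List (List String) :=
  [["you", "know"], ["i", "mean"], ["kind", "of"], ["sort", "of"], ["like", "you", "know"]]

-- A's inner loop: for j, p_word in enumerate(phrase): compare, break on mismatch
def pvMatchAt (words : List (List (String × String))) (idx : Int) : List String → Int → Bool
  | [], _ => true
  | p :: rest, j => if pvNorm words (idx + j) == p then pvMatchAt words idx rest (j + 1) else false

def check_phrase_filler_py (words : List (List (String × String))) (idx : Int) : Bool :=
  FILLER_PHRASES.any (fun phrase =>
    decide (idx + (phrase.length : Int) ≤ (words.length : Int)) && pvMatchAt words idx phrase 0)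

-- ===== PORT B =====
-- one refinement step of B's comprehension [p[1:] for p in cands if p[0] == w]
def pvStep (w : String) : List String → Option (List String)
  | [] => none
  | x :: r => if x == w then some r else none

-- termination helper for B's while loop: filtering to strict tails shrinks the total length
theorem pvRefine_measure (w : String) (l : List (List String))
    (hne : l ≠ []) (hall : ¬ l.any (fun p => p.isEmpty)) :
    ((l.filterMap (pvStep w)).map List.length).sum < (l.map List.length).sum := by
  have key : ∀ (m : List (List String)), (¬ m.any (fun p => p.isEmpty)) →
      ((m.filterMap (pvStep w)).map List.length).sum + m.length ≤ (m.map List.length).sum := by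
    intro m hm
    induction m with
    | nil => simp
    | cons c cs ih =>
      simp only [List.any_cons, Bool.or_eq_true, not_or] at hm
      have ihcs := ih hm.2
      obtain ⟨x, r, rfl⟩ : ∃ x r, c = x :: r := by
        cases c with
        | nil => simp at hm
        | cons x r => exact ⟨x, r, rfl⟩
      rw [List.filterMap_cons]
      by_cases hx : x = w
      · rw [show pvStep w (x :: r) = some r from by simp [pvStep, hx]]
        simp only [List.map_cons, List.sum_cons, List.length_cons]; omega
      · rw [show pvStep w (x :: r) = none from by simp [pvStep, hx]]
        simp only [List.map_cons, List.sum_cons, List.length_cons]; omega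
  have h1 := key l hall
  have h2 : 0 < l.length := List.length_pos_iff.mpr hne
  omega

-- B's while loop: cands holds the unconsumed suffixes of the still-viable fitting phrases
def pvRefine (words : List (List (String × String))) (idx : Int) :
    List (List String) → Int → Bool
  | [], _ => false
  | c :: cs, d =>
      if h : (c :: cs).any (fun p => p.isEmpty) then true
      else pvRefine words idx ((c :: cs).filterMap (pvStep (pvNorm words (idx + d)))) (d + 1)
termination_by cands _ => (cands.map List.length).sum
decreasing_by exact pvRefine_measure _ _ (by simp) h

def check_phrase_filler_py_alt (words : List (List (String × String))) (idx : Int) : Bool :=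
  pvRefine words idx
    (FILLER_PHRASES.filter (fun p => decide (idx + (p.length : Int) ≤ (words.length : Int)))) 0

-- ===== PRECONDITION & SPEC =====
-- position i is readable as Python A reads it: in range (negative wraparound included) and
-- its dict carries a "word" key
def pvSafe (words : List (List (String × String))) (i : Int) : Prop :=
  PySem.Raise.InRange words.length i ∧
    "word" ∈ (((PySem.List.pyGet? words i).getD []).map Prod.fst)

-- Pre_ excludes exactly the inputs on which Python A raises (IndexError/KeyError while reading
-- a word position): each position the phrase matching actually inspects — idx when a phrase
-- fits, idx+1 when the first token matched a fitting phrase's first word, idx+2 when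
-- "like you" matched with the 3-word phrase fitting — must be in range with a "word" key.
def Pre_check_phrase_filler_py (words : List (List (String × String))) (idx : Int) : Prop :=
  (idx + 2 ≤ (words.length : Int) → pvSafe words idx)
  ∧ ((idx + 2 ≤ (words.length : Int) ∧ pvNorm words idx ∈ ["you", "i", "kind", "sort"]) ∨
       (idx + 3 ≤ (words.length : Int) ∧ pvNorm words idx = "like") →
      pvSafe words (idx + 1))
  ∧ (idx + 3 ≤ (words.length : Int) ∧ pvNorm words idx = "like" ∧
       pvNorm words (idx + 1) = "you" →
      pvSafe words (idx + 2))

instance (words : List (List (String × String))) (idx : Int) :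
    Decidable (Pre_check_phrase_filler_py words idx) := by
  unfold Pre_check_phrase_filler_py pvSafe; infer_instance

def pvWitness_check_phrase_filler_py : (List (List (String × String))) × Int :=
  ([[("word", "you")], [("word", "know")]], 0)

def Spec_check_phrase_filler_py (words : List (List (String × String))) (idx : Int) (out : Bool) : Prop := out = check_phrase_filler_py_alt words idx
instance (words : List (List (String × String))) (idx : Int) (out : Bool) : Decidable (Spec_check_phrase_filler_py words idx out) := by unfold Spec_check_phrase_filler_py; infer_instance

-- ===== CLAIM (what is proved, stated in full; the proofs are below) =====
def Claim_equal_check_phrase_filler_py : Prop := ∀ (words : List (List (String × String))) (idx : Int), Dom_check_phrase_filler_py words idx → Pre_check_phrase_filler_py words idx → Spec_check_phrase_filler_py words idx (check_phrase_filler_py words idx)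

-- ===== LEMMAS AND PROOFS =====
-- pointwise congruence for List.any, used to push the refinement step inside
theorem pv_any_ext {α : Type} (l : List α) (p q : α → Bool)
    (hpq : ∀ a ∈ l, p a = q a) : l.any p = l.any q := by
  induction l with
  | nil => rfl
  | cons a l ih =>
    simp only [List.any_cons, hpq a (by simp)]
    rw [ih (fun b hb => hpq b (by simp [hb]))]

-- B's refinement loop computes "some candidate suffix matches from offset d onward"
theorem pvRefine_eq_any (words : List (List (String × String))) (idx : Int)
    (cands : List (List String)) (d : Int) :
    pvRefine words idx cands d = cands.any (fun p => pvMatchAt words idx p d) := by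
  induction cands, d using pvRefine.induct words idx with
  | case1 d => simp [pvRefine]
  | case2 c cs d h =>
    rw [pvRefine, dif_pos h]
    simp only [List.any_eq_true, List.isEmpty_iff] at h
    obtain ⟨p, hp, hpe⟩ := h
    exact (List.any_eq_true.mpr ⟨p, hp, by simp [hpe, pvMatchAt]⟩).symm
  | case3 c cs d h ih =>
    rw [pvRefine, dif_neg h, ih, List.any_filterMap]
    apply pv_any_ext
    intro p hp
    simp only [List.any_eq_true, List.isEmpty_iff, not_exists, not_and] at h
    obtain ⟨x, r, rfl⟩ : ∃ x r, p = x :: r := by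
      cases p with
      | nil => exact absurd rfl (h _ hp)
      | cons x r => exact ⟨x, r, rfl⟩
    by_cases hx : x = pvNorm words (idx + d)
    · rw [show pvStep (pvNorm words (idx + d)) (x :: r) = some r from by simp [pvStep, hx]]
      simp [pvMatchAt, hx]
    · rw [show pvStep (pvNorm words (idx + d)) (x :: r) = none from by simp [pvStep, hx]]
      simp [pvMatchAt, Ne.symm hx]

theorem pv_A_eq_B : ∀ (words : List (List (String × String))) (idx : Int),
    check_phrase_filler_py words idx = check_phrase_filler_py_alt words idx := by
  intro words idx
  unfold check_phrase_filler_py check_phrase_filler_py_alt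
  rw [pvRefine_eq_any, List.any_filter]

-- ===== VERDICT (by name: the statement is the Claim_ definition above) =====
theorem check_phrase_filler_py_spec : Claim_equal_check_phrase_filler_py := by
  intro words idx _ _
  unfold Spec_check_phrase_filler_py
  exact pv_A_eq_B words idx
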